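-- pv_equiv track=rewrite | github.com/Jacobdrosol/NexusAI | control_plane/orchestration/run_store.py | _aggregate_node_status
-- ===== SOURCE A (Python) =====
-- from typing import Any, Dict, List, Optional, Tuple
--
-- def _aggregate_node_status(statuses: List[str]) -> str:
--     if not statuses:
--         return "queued"
--     priority = {
--         "failed": 90,
--         "canceled": 80,
--         "running": 70,
--         "blocked": 60,
--         "queued": 50,
--         "ready": 40,
--         "succeeded": 30,
--         "skipped": 20,
--     }
--     ranked = sorted(statuses, key=lambda item: priority.get(str(item or "").strip().lower(), 0), reverse=True)
--     if all(str(item).lower() in {"succeeded", "skipped"} for item in statuses):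
--         if all(str(item).lower() == "skipped" for item in statuses):
--             return "skipped"
--         return "succeeded"
--     return str(ranked[0] or "queued").strip().lower()
-- ===== SOURCE B (Python) =====
-- from typing import List
--
--
-- def _prio(item: str) -> int:
--     s = str(item or "").strip().lower()
--     if s == "failed":
--         return 90
--     elif s == "canceled":
--         return 80
--     elif s == "running":
--         return 70
--     elif s == "blocked":
--         return 60
--     elif s == "queued":
--         return 50
--     elif s == "ready":
--         return 40
--     elif s == "succeeded":
--         return 30
--     elif s == "skipped":
--         return 20
--     return 0
--
--
-- def _aggregate_node_status(statuses: List[str]) -> str: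
--     if not statuses:
--         return "queued"
--     # single linear pass: first max-priority element + the two "all ..." flags
--     best = None
--     best_p = -1
--     all_ok = True
--     all_skipped = True
--     for item in statuses:
--         p = _prio(item)
--         if best_p < p:
--             best, best_p = item, p
--         low = str(item).lower()
--         if low == "skipped":
--             pass
--         elif low == "succeeded":
--             all_skipped = False
--         else:
--             all_ok = False
--             all_skipped = False
--     if all_ok:
--         return "skipped" if all_skipped else "succeeded"
--     return str(best or "queued").strip().lower()
-- ===== Notes on version B (the rewrite author's own statement) =====
-- stated objective: alternative
-- what changed: replaces the sort-then-head aggregation (plus two further full 'all' scans) by a single linear pass that tracks the first max-priority element and the all-skipped/all-in-{succeeded,skipped} flags, and replaces the priority dict by a plain comparison chain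
import Mathlib
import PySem

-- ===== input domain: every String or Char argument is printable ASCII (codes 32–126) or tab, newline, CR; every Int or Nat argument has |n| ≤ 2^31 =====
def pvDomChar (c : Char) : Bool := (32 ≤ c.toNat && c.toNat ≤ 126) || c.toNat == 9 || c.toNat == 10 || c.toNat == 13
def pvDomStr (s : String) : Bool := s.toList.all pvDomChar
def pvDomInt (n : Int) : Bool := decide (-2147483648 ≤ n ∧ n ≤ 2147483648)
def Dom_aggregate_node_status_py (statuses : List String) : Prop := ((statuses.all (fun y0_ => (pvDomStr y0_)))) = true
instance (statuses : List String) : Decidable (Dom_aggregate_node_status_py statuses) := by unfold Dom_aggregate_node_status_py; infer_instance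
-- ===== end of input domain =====

-- B replaces A's sort-then-take-head (plus two further full scans) by ONE linear pass that keeps
-- the first maximum-priority element and the all-skipped / all-in-{succeeded,skipped} flags.

-- ===== PORT A =====
-- the literal 'priority' dict of A, built by insertion
def pvPriorityA : PySem.Dict String Int :=
  ((((((((PySem.Dict.empty.insert "failed" 90).insert "canceled" 80).insert "running" 70).insert
      "blocked" 60).insert "queued" 50).insert "ready" 40).insert "succeeded" 30).insert "skipped" 20)

-- A's sort key: priority.get(str(item or "").strip().lower(), 0)
def pvKeyA (item : String) : Int :=
  pvPriorityA.getD (PySem.Str.lower (PySem.Str.strip (if item = "" then "" else item))) 0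

def aggregate_node_status_py (statuses : List String) : String :=
  if statuses = [] then "queued"
  else
    let ranked := PySem.List.sorted statuses pvKeyA true
    if statuses.all (fun item => PySem.Str.lower item == "succeeded" || PySem.Str.lower item == "skipped") then
      if statuses.all (fun item => PySem.Str.lower item == "skipped") then "skipped" else "succeeded"
    else
      let h := PySem.List.pyGetD ranked 0 ""
      PySem.Str.lower (PySem.Str.strip (if h = "" then "queued" else h))

-- ===== PORT B =====
-- B's priority function: a plain comparison chain instead of a dict
def pvPrioB (item : String) : Int :=
  let s := PySem.Str.lower (PySem.Str.strip (if item = "" then "" else item))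
  if s = "failed" then 90
  else if s = "canceled" then 80
  else if s = "running" then 70
  else if s = "blocked" then 60
  else if s = "queued" then 50
  else if s = "ready" then 40
  else if s = "succeeded" then 30
  else if s = "skipped" then 20
  else 0

-- B's single pass: state = (best, best_p, all_ok, all_skipped)
def pvLoopB : List String → Option String → Int → Bool → Bool → (Option String × Int × Bool × Bool)
  | [], best, bestP, allOk, allSk => (best, bestP, allOk, allSk)
  | item :: rest, best, bestP, allOk, allSk =>
    let p := pvPrioB item
    let st := if bestP < p then (some item, p) else (best, bestP)
    let low := PySem.Str.lower item
    if low == "skipped" then pvLoopB rest st.1 st.2 allOk allSk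
    else if low == "succeeded" then pvLoopB rest st.1 st.2 allOk false
    else pvLoopB rest st.1 st.2 false false

def aggregate_node_status_py_alt (statuses : List String) : String :=
  if statuses = [] then "queued"
  else
    let r := pvLoopB statuses none (-1) true true
    if r.2.2.1 then (if r.2.2.2 then "skipped" else "succeeded")
    else
      let b := match r.1 with
        | none => "queued"
        | some s => if s = "" then "queued" else s
      PySem.Str.lower (PySem.Str.strip b)

-- ===== PRECONDITION & SPEC =====
def Spec_aggregate_node_status_py (statuses : List String) (out : String) : Prop := out = aggregate_node_status_py_alt statuses
instance (statuses : List String) (out : String) : Decidable (Spec_aggregate_node_status_py statuses out) := by unfold Spec_aggregate_node_status_py; infer_instance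

-- ===== CLAIM (what is proved, stated in full; the proofs are below) =====
def Claim_equal_aggregate_node_status_py : Prop := ∀ (statuses : List String), Dom_aggregate_node_status_py statuses → Spec_aggregate_node_status_py statuses (aggregate_node_status_py statuses)

-- ===== LEMMAS AND PROOFS =====

-- B's comparison chain computes A's dict lookup
lemma pvKey_eq (s : String) : pvPrioB s = pvKeyA s := by
  unfold pvPrioB pvKeyA
  generalize PySem.Str.lower (PySem.Str.strip (if s = "" then "" else s)) = t
  have hd : pvPriorityA = PySem.Dict.mk [("failed", 90), ("canceled", 80), ("running", 70),
      ("blocked", 60), ("queued", 50), ("ready", 40), ("succeeded", 30), ("skipped", 20)] := by rfl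
  rw [hd]
  by_cases h1 : t = "failed"; · subst h1; decide
  rw [if_neg h1]
  by_cases h2 : t = "canceled"; · subst h2; decide
  rw [if_neg h2]
  by_cases h3 : t = "running"; · subst h3; decide
  rw [if_neg h3]
  by_cases h4 : t = "blocked"; · subst h4; decide
  rw [if_neg h4]
  by_cases h5 : t = "queued"; · subst h5; decide
  rw [if_neg h5]
  by_cases h6 : t = "ready"; · subst h6; decide
  rw [if_neg h6]
  by_cases h7 : t = "succeeded"; · subst h7; decide
  rw [if_neg h7]
  by_cases h8 : t = "skipped"; · subst h8; decide
  rw [if_neg h8]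
  simp [PySem.Dict.getD, PySem.Dict.get?, Ne.symm h1, Ne.symm h2, Ne.symm h3,
    Ne.symm h4, Ne.symm h5, Ne.symm h6, Ne.symm h7, Ne.symm h8]

lemma pvPrioB_nonneg (s : String) : 0 ≤ pvPrioB s := by
  rw [pvKey_eq]
  unfold pvKeyA
  generalize PySem.Str.lower (PySem.Str.strip (if s = "" then "" else s)) = t
  have hd : pvPriorityA = PySem.Dict.mk [("failed", 90), ("canceled", 80), ("running", 70),
      ("blocked", 60), ("queued", 50), ("ready", 40), ("succeeded", 30), ("skipped", 20)] := by rfl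
  rw [hd]
  simp only [PySem.Dict.getD, PySem.Dict.get?_mk_cons]
  split_ifs <;> simp [PySem.Dict.get?]

-- the flag components of B's loop are the two 'all' scans of A
lemma pvLoopB_flags (l : List String) : ∀ (best : Option String) (p : Int) (ok sk : Bool),
    (pvLoopB l best p ok sk).2.2.1
      = (ok && l.all (fun item => PySem.Str.lower item == "succeeded" || PySem.Str.lower item == "skipped"))
    ∧ (pvLoopB l best p ok sk).2.2.2
      = (sk && l.all (fun item => PySem.Str.lower item == "skipped")) := by
  induction l with
  | nil => intro best p ok sk; simp [pvLoopB]
  | cons x t ih =>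
    intro best p ok sk
    by_cases h1 : PySem.Str.lower x = "skipped"
    · simp [pvLoopB, h1, ih]
    · by_cases h2 : PySem.Str.lower x = "succeeded"
      · simp [pvLoopB, h2, ih]
      · simp [pvLoopB, h1, h2, ih]

-- the best component of B's loop is the first-argmax fold
lemma pvLoopB_best (l : List String) : ∀ (b : String) (ok sk : Bool),
    (pvLoopB l (some b) (pvPrioB b) ok sk).1
      = some (l.foldl (fun m y => if pvPrioB m < pvPrioB y then y else m) b) := by
  induction l with
  | nil => intro b ok sk; simp [pvLoopB]
  | cons x t ih =>
    intro b ok sk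
    by_cases hp : pvPrioB b < pvPrioB x
    · by_cases h1 : PySem.Str.lower x = "skipped"
      · simp [pvLoopB, hp, h1, ih]
      · by_cases h2 : PySem.Str.lower x = "succeeded"
        · simp [pvLoopB, hp, h2, ih]
        · simp [pvLoopB, hp, h1, h2, ih]
    · by_cases h1 : PySem.Str.lower x = "skipped"
      · simp [pvLoopB, hp, h1, ih]
      · by_cases h2 : PySem.Str.lower x = "succeeded"
        · simp [pvLoopB, hp, h2, ih]
        · simp [pvLoopB, hp, h1, h2, ih]

lemma pv_insertBy_nil (before : String → String → Bool) (x : String) :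
    PySem.List.insertBy before x [] = [x] := rfl

lemma pv_insertBy_cons (before : String → String → Bool) (x y : String) (ys : List String) :
    PySem.List.insertBy before x (y :: ys) =
      if before x y = true then x :: y :: ys else y :: PySem.List.insertBy before x ys := rfl

-- head of the stable reverse insertion sort = first-argmax fold
lemma head_foldl_insertBy (l : List String) : ∀ (acc : List String) (m : String),
    acc.head? = some m →
    (l.foldl (fun acc x => PySem.List.insertBy (fun a b => decide (pvKeyA b < pvKeyA a)) x acc) acc).head?
      = some (l.foldl (fun b y => if pvKeyA b < pvKeyA y then y else b) m) := by
  induction l with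
  | nil => intro acc m h; exact h
  | cons x t ih =>
    intro acc m h
    cases acc with
    | nil => simp at h
    | cons a ys =>
      simp only [List.head?_cons, Option.some.injEq] at h
      subst h
      by_cases hc : pvKeyA a < pvKeyA x
      · rw [List.foldl_cons, pv_insertBy_cons, if_pos (by simpa using hc),
          ih (x :: a :: ys) x rfl, List.foldl_cons, if_pos hc]
      · rw [List.foldl_cons, pv_insertBy_cons, if_neg (by simpa using hc),
          ih (a :: PySem.List.insertBy _ x ys) a rfl, List.foldl_cons, if_neg hc]

lemma agg_eq (statuses : List String) :
    aggregate_node_status_py statuses = aggregate_node_status_py_alt statuses := by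
  cases statuses with
  | nil => rfl
  | cons x t =>
    unfold aggregate_node_status_py aggregate_node_status_py_alt
    simp only [reduceCtorEq, if_false]
    -- A's ranked head
    have hsort : (PySem.List.sorted (x :: t) pvKeyA true).head?
        = some (t.foldl (fun b y => if pvKeyA b < pvKeyA y then y else b) x) := by
      rw [PySem.List.sorted_rev_eq_foldl_insertBy, List.foldl_cons, pv_insertBy_nil]
      exact head_foldl_insertBy t [x] x rfl
    set M := t.foldl (fun b y => if pvKeyA b < pvKeyA y then y else b) x with hM
    -- B's loop after the first step
    have hstep : ∃ ok sk : Bool,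
        pvLoopB (x :: t) none (-1) true true = pvLoopB t (some x) (pvPrioB x) ok sk ∧
        (ok = (PySem.Str.lower x == "succeeded" || PySem.Str.lower x == "skipped")) ∧
        (sk = (PySem.Str.lower x == "skipped")) := by
      have hneg : (-1 : Int) < pvPrioB x := lt_of_lt_of_le (by norm_num) (pvPrioB_nonneg x)
      by_cases h1 : PySem.Str.lower x = "skipped"
      · exact ⟨true, true, by simp [pvLoopB, hneg, h1], by simp [h1], by simp [h1]⟩
      · by_cases h2 : PySem.Str.lower x = "succeeded"
        · exact ⟨true, false, by simp [pvLoopB, hneg, h2], by simp [h2], by simp [h1]⟩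
        · exact ⟨false, false, by simp [pvLoopB, hneg, h1, h2], by simp [h1, h2], by simp [h1]⟩
    obtain ⟨ok, sk, hr, hok, hsk⟩ := hstep
    -- flags
    obtain ⟨hf1, hf2⟩ := pvLoopB_flags t (some x) (pvPrioB x) ok sk
    -- best
    have hbest : (pvLoopB t (some x) (pvPrioB x) ok sk).1 = some M := by
      have h2 : t.foldl (fun m y => if pvPrioB m < pvPrioB y then y else m) x = M := by
        rw [hM]
        apply PySem.List.foldl_congr_mem
        intro b y _
        simp [pvKey_eq]
      rw [pvLoopB_best t x ok sk, h2]
    rw [hok, hsk] at hr hf1 hf2 hbest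
    rw [hr, hf1, hf2]
    simp only [List.all_cons]
    by_cases hA : ((PySem.Str.lower x == "succeeded" || PySem.Str.lower x == "skipped")
        && t.all (fun item => PySem.Str.lower item == "succeeded" || PySem.Str.lower item == "skipped")) = true
    · rw [if_pos hA, if_pos hA]
      rfl
    · rw [if_neg hA, if_neg hA]
      have hhead : PySem.List.pyGetD (PySem.List.sorted (x :: t) pvKeyA true) 0 "" = M := by
        rw [PySem.List.pyGetD_zero]
        cases hs : (PySem.List.sorted (x :: t) pvKeyA true) with
        | nil => rw [hs] at hsort; simp at hsort
        | cons a u => rw [hs] at hsort; simp at hsort; simp [hsort]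
      rw [hhead, hbest]

-- ===== VERDICT (by name: the statement is the Claim_ definition above) =====
theorem aggregate_node_status_py_spec : Claim_equal_aggregate_node_status_py := by
  intro statuses _
  unfold Spec_aggregate_node_status_py
  exact agg_eq statuses
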